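-- pv_equiv track=rewrite | github.com/Shivamsingh9624/DSA_Python | Duplicate_Brackets.py | hasDuplicateParenthesis
-- ===== SOURCE A (Python) =====
-- from collections import deque
--
-- def hasDuplicateParenthesis(exp):
-- 	if not exp or len(exp) <= 3:
-- 		return False
--
-- 	stack = deque()
--
-- 	for i in exp:
--
-- 		if i != ')':
-- 			stack.append(i)
-- 		else:
-- 			if stack[-1] == '(':
-- 				return True
-- 			while stack[-1] != '(':
-- 				stack.pop()
-- 			stack.pop()
-- 	return False
-- ===== SOURCE B (Python) =====
-- def hasDuplicateParenthesis(exp):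
--     if not exp or len(exp) <= 3:
--         return False
--     counts = []
--     for ch in exp:
--         if ch == '(':
--             counts.append(0)
--         elif ch == ')':
--             if counts[-1] == 0:
--                 return True
--             counts.pop()
--         elif counts:
--             counts[-1] += 1
--     return False
-- ===== Notes on version B (the rewrite author's own statement) =====
-- stated objective: alternative
-- what changed: Replaces the character deque (pushing every char and popping an inner while-loop back to '(' on each ')') with a stack of integer counts of live tokens per open group, so each ')' is handled in O(1) without any inner pop loop.
-- outside the precondition, e.g. on hasDuplicateParenthesis('(())x)'): A returns True, B returns True
import Mathlib
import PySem

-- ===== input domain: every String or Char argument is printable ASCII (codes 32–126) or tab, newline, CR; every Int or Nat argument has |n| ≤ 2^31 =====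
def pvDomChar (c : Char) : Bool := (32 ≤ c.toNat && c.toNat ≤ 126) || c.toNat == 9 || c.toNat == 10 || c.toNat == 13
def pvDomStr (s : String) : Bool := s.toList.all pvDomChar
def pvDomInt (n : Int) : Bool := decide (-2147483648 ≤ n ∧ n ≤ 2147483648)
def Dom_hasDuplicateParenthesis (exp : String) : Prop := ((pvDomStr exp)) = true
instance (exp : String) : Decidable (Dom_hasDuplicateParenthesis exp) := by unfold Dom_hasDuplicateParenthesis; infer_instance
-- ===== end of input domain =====

-- B replaces A's character deque (with an inner pop-to-'(' loop on each ')') by a stack of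
-- integer counts of live tokens per open group, handling each ')' in O(1); same return value.


-- ===== PORT A =====
-- while stack[-1] != '(': stack.pop(); stack.pop()   (on empty stack Python raises; excluded by Pre_)
def pvPopToParen : List Char → List Char
  | [] => []
  | c :: s => if c = '(' then s else pvPopToParen s

-- the for-loop over exp; stack head = deque's right end (stack[-1])
def pvALoop : List Char → List Char → Bool
  | _, [] => false
  | stack, c :: rest =>
    if c ≠ ')' then pvALoop (c :: stack) rest
    else
      if stack.head? = some '(' then true   -- stack[-1] == '(' (empty stack raises; excluded by Pre_)
      else pvALoop (pvPopToParen stack) rest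

def hasDuplicateParenthesis (exp : String) : Bool :=
  if exp.toList = [] ∨ exp.toList.length ≤ 3 then false
  else pvALoop [] exp.toList

-- ===== PORT B =====
-- counts head = counts[-1]; counts[-1] on an empty stack raises in Python (excluded by Pre_)
def pvBLoop : List Nat → List Char → Bool
  | _, [] => false
  | counts, c :: rest =>
    if c = '(' then pvBLoop (0 :: counts) rest
    else if c = ')' then
      match counts with
      | [] => false                     -- Python raises IndexError here; excluded by Pre_
      | t :: ts => if t = 0 then true else pvBLoop ts rest
    else
      match counts with
      | [] => pvBLoop [] rest
      | t :: ts => pvBLoop ((t + 1) :: ts) rest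

def hasDuplicateParenthesis_alt (exp : String) : Bool :=
  if exp.toList = [] ∨ exp.toList.length ≤ 3 then false
  else pvBLoop [] exp.toList

-- ===== PRECONDITION & SPEC =====
-- Pre_ excludes strings longer than 3 having a prefix with more ')' than '(' : on such inputs both
-- programs usually raise IndexError at the unmatched ')', but on a few A (and B alike) returns True
-- at an earlier empty pair before reaching it — e.g. "(())x)" where both return True.
def Pre_hasDuplicateParenthesis (exp : String) : Prop :=
  exp.toList.length ≤ 3 ∨
    ∀ p ∈ exp.toList.inits, p.count ')' ≤ p.count '('
instance (exp : String) : Decidable (Pre_hasDuplicateParenthesis exp) := by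
  unfold Pre_hasDuplicateParenthesis; infer_instance
def pvWitness_hasDuplicateParenthesis : String := "((a))"
def Spec_hasDuplicateParenthesis (exp : String) (out : Bool) : Prop := out = hasDuplicateParenthesis_alt exp
instance (exp : String) (out : Bool) : Decidable (Spec_hasDuplicateParenthesis exp out) := by unfold Spec_hasDuplicateParenthesis; infer_instance

-- ===== CLAIM (what is proved, stated in full; the proofs are below) =====
def Claim_equal_hasDuplicateParenthesis : Prop := ∀ (exp : String), Dom_hasDuplicateParenthesis exp → Pre_hasDuplicateParenthesis exp → Spec_hasDuplicateParenthesis exp (hasDuplicateParenthesis exp)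

-- ===== LEMMAS AND PROOFS =====

-- A's stack always has the shape  seg_k ++ '(' :: … ++ seg_1 ++ '(' :: base  with '('-free
-- segments; B's counts are exactly the segment lengths.
def pvEncode : List (List Char) → List Char → List Char
  | [], base => base
  | s :: ss, base => s ++ '(' :: pvEncode ss base

theorem pvPopToParen_encode (s : List Char) (t : List Char) (hs : '(' ∉ s) :
    pvPopToParen (s ++ '(' :: t) = t := by
  induction s with
  | nil => simp [pvPopToParen]
  | cons c s ih =>
    simp only [List.mem_cons, not_or] at hs
    simp [pvPopToParen, Ne.symm hs.1, ih hs.2]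

theorem pvLoop_agree (rest : List Char) (segs : List (List Char)) (base : List Char)
    (hsegs : ∀ s ∈ segs, '(' ∉ s)
    (hbal : ∀ n, (rest.take n).count ')' ≤ (rest.take n).count '(' + segs.length) :
    pvALoop (pvEncode segs base) rest = pvBLoop (segs.map List.length) rest := by
  induction rest generalizing segs base with
  | nil => simp [pvALoop, pvBLoop]
  | cons c rest ih =>
    by_cases hc : c = '('
    · subst hc
      have hA : pvALoop (pvEncode segs base) ('(' :: rest)
          = pvALoop (pvEncode ([] :: segs) base) rest := by
        simp [pvALoop, pvEncode]
      rw [hA]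
      have := ih ([] :: segs) base
        (by
          intro s hs
          rcases List.mem_cons.mp hs with h | h
          · simp [h]
          · exact hsegs s h)
        (by
          intro n
          have h := hbal (n + 1)
          simp at h ⊢
          omega)
      simpa [pvBLoop] using this
    · by_cases hcr : c = ')'
      · subst hcr
        have h1 := hbal 1
        simp at h1
        match segs, h1 with
        | s :: ss, _ =>
          have hs : '(' ∉ s := hsegs s (by simp)
          have hss : ∀ x ∈ ss, '(' ∉ x := fun x hx => hsegs x (by simp [hx])
          cases s with
          | nil =>
            simp [pvALoop, pvBLoop, pvEncode]
          | cons d s' =>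
            simp only [List.mem_cons, not_or] at hs
            have hA : pvALoop (pvEncode ((d :: s') :: ss) base) (')' :: rest)
                = pvALoop (pvEncode ss base) rest := by
              simp only [pvALoop, pvEncode]
              rw [if_neg (by simp), if_neg (by simp [List.head?]; exact Ne.symm hs.1)]
              congr 1
              exact pvPopToParen_encode (d :: s') (pvEncode ss base)
                (by simp only [List.mem_cons, not_or]; exact ⟨hs.1, hs.2⟩)
            rw [hA]
            have := ih ss base hss
              (by
                intro n
                have h := hbal (n + 1)
                simp at h
                omega)
            simpa [pvBLoop] using this
      · -- ordinary character
        have hA : pvALoop (pvEncode segs base) (c :: rest)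
            = pvALoop (c :: pvEncode segs base) rest := by
          simp [pvALoop, hcr]
        rw [hA]
        match segs with
        | [] =>
          have := ih [] (c :: base) (by simp)
            (by
              intro n
              have h := hbal (n + 1)
              simp [hc, hcr] at h ⊢
              simpa using h)
          simpa [pvBLoop, hc, hcr, pvEncode] using this
        | s :: ss =>
          have hA2 : (c :: pvEncode (s :: ss) base) = pvEncode ((c :: s) :: ss) base := by
            simp [pvEncode]
          rw [hA2]
          have := ih ((c :: s) :: ss) base
            (by
              intro x hx
              rcases List.mem_cons.mp hx with h | h
              · subst h; simp only [List.mem_cons, not_or]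
                exact ⟨Ne.symm hc, hsegs s (by simp)⟩
              · exact hsegs x (List.mem_cons_of_mem _ h))
            (by
              intro n
              have h := hbal (n + 1)
              simp [hc, hcr] at h ⊢
              simpa using h)
          simpa [pvBLoop, hc, hcr] using this

theorem pv_take_count (l : List Char) (h : ∀ p ∈ l.inits, p.count ')' ≤ p.count '(') :
    ∀ n, (l.take n).count ')' ≤ (l.take n).count '(' := by
  intro n
  exact h (l.take n) (by simp [List.mem_inits]; exact List.take_prefix n l)

-- ===== VERDICT (by name: the statement is the Claim_ definition above) =====
theorem hasDuplicateParenthesis_spec : Claim_equal_hasDuplicateParenthesis := by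
  intro exp _ hpre
  unfold Spec_hasDuplicateParenthesis hasDuplicateParenthesis hasDuplicateParenthesis_alt
  by_cases hsz : exp.toList = [] ∨ exp.toList.length ≤ 3
  · rw [if_pos hsz, if_pos hsz]
  · rw [if_neg hsz, if_neg hsz]
    rcases hpre with h | h
    · exact absurd (Or.inr h) hsz
    · have := pvLoop_agree exp.toList [] [] (by simp)
        (by intro n; simpa using pv_take_count exp.toList h n)
      simpa [pvEncode] using this
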